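-- pv_equiv track=rewrite | github.com/YumaYazaki/MAPF_smoothing | MAPF/orientation_lacam_backend_v5.py | _reconstruct_paths_from_config_sequence
-- ===== SOURCE A (Python) =====
-- from typing import Dict, FrozenSet, List, Optional, Sequence, Set, Tuple
--
-- Config = Tuple[int, ...]
--
-- def _reconstruct_paths_from_config_sequence(
--
--     config_sequence: Sequence[Config],
-- ) -> Dict[int, List[int]]:
--     """config sequence をロボット別状態列へ復元する。"""
--     if not config_sequence:
--         raise ValueError("config_sequence must not be empty")
--
--     num_agents = len(config_sequence[0])
--     paths_by_agent: Dict[int, List[int]] = {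
--         robot_id: [] for robot_id in range(num_agents)
--     }
--
--     for config in config_sequence:
--         if len(config) != num_agents:
--             raise ValueError("Inconsistent config size in config_sequence")
--         for robot_id in range(num_agents):
--             paths_by_agent[robot_id].append(config[robot_id])
--
--     return paths_by_agent
-- ===== SOURCE B (Python) =====
-- def _reconstruct_paths_from_config_sequence(config_sequence):
--     """Validate first, then transpose column-wise in one shot."""
--     if not config_sequence:
--         raise ValueError("config_sequence must not be empty")
--     num_agents = len(config_sequence[0])
--     for config in config_sequence:
--         if len(config) != num_agents:
--             raise ValueError("Inconsistent config size in config_sequence")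
--     return {
--         robot_id: [config[robot_id] for config in config_sequence]
--         for robot_id in range(num_agents)
--     }
-- ===== Notes on version B (the rewrite author's own statement) =====
-- stated objective: idiomatic
-- what changed: A interleaves validation with per-element appends into a pre-built dict of empty lists; B first runs a separate validation pass and then builds each agent's whole column at once with a single dict comprehension (a column-oriented transpose, no mutation).
import Mathlib
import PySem

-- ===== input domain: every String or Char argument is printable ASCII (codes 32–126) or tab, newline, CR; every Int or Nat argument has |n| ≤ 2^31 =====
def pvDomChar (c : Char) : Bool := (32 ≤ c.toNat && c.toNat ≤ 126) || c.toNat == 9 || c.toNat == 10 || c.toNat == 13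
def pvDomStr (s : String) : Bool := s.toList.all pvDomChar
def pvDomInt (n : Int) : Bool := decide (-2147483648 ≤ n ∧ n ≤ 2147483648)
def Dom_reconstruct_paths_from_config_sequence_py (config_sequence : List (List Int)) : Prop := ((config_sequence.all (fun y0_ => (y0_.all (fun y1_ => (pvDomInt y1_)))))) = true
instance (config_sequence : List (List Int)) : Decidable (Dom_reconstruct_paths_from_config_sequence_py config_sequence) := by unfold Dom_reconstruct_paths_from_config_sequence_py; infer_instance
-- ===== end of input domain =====

-- B separates a validation pass from a column-oriented dict-comprehension transpose,
-- instead of A's interleaved per-element appends into a pre-built dict of empty lists.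
-- A mutates nothing observable; equivalence is about the return value.

-- ===== PORT A =====
-- config[robot_id]: Python raises IndexError out of range; under Pre_ every index is
-- in range, so the `.getD 0` fallback is never taken.
def reconstruct_paths_from_config_sequence_py (config_sequence : List (List Int)) : List (Int × List Int) :=
  match config_sequence with
  | [] => []   -- unreachable under Pre_ (Python raises ValueError)
  | c0 :: _ =>
    let num_agents : Int := (c0.length : Int)
    let init : PySem.Dict Int (List Int) :=
      (PySem.List.pyRange 0 num_agents).foldl (fun d i => d.insert i ([] : List Int)) PySem.Dict.empty
    let final : PySem.Dict Int (List Int) :=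
      config_sequence.foldl
        (fun d config =>
          (PySem.List.pyRange 0 num_agents).foldl
            (fun d i => d.modify i [] (fun l => l ++ [(PySem.List.pyGet? config i).getD 0])) d)
        init
    final.items

-- ===== PORT B =====
def reconstruct_paths_from_config_sequence_py_alt (config_sequence : List (List Int)) : List (Int × List Int) :=
  match config_sequence with
  | [] => []   -- unreachable under Pre_ (B raises ValueError too)
  | c0 :: _ =>
    let num_agents : Int := (c0.length : Int)
    -- validation pass raises outside Pre_; inside Pre_ it is a no-op, then one transpose:
    (PySem.List.pyRange 0 num_agents).map
      (fun robot_id =>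
        (robot_id, config_sequence.map (fun config => (PySem.List.pyGet? config robot_id).getD 0)))

-- ===== PRECONDITION & SPEC =====
-- Pre_ excludes exactly the inputs on which Python A raises ValueError: the empty
-- sequence and sequences whose configs do not all have the first config's length.
def Pre_reconstruct_paths_from_config_sequence_py (config_sequence : List (List Int)) : Prop :=
  config_sequence ≠ [] ∧
  ∀ c ∈ config_sequence, c.length = (config_sequence.headD []).length
instance (config_sequence : List (List Int)) : Decidable (Pre_reconstruct_paths_from_config_sequence_py config_sequence) := by unfold Pre_reconstruct_paths_from_config_sequence_py; infer_instance

def pvWitness_reconstruct_paths_from_config_sequence_py : List (List Int) := [[1, 2], [3, 4], [5, 6]]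

def Spec_reconstruct_paths_from_config_sequence_py (config_sequence : List (List Int)) (out : List (Int × List Int)) : Prop := out = reconstruct_paths_from_config_sequence_py_alt config_sequence
instance (config_sequence : List (List Int)) (out : List (Int × List Int)) : Decidable (Spec_reconstruct_paths_from_config_sequence_py config_sequence out) := by unfold Spec_reconstruct_paths_from_config_sequence_py; infer_instance

-- ===== CLAIM (what is proved, stated in full; the proofs are below) =====
def Claim_equal_reconstruct_paths_from_config_sequence_py : Prop := ∀ (config_sequence : List (List Int)), Dom_reconstruct_paths_from_config_sequence_py config_sequence → Pre_reconstruct_paths_from_config_sequence_py config_sequence → Spec_reconstruct_paths_from_config_sequence_py config_sequence (reconstruct_paths_from_config_sequence_py config_sequence)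

-- ===== LEMMAS AND PROOFS =====

-- PySem.Set.update leaves a key set unchanged when every updated key is already present.
theorem pvSet_update_of_subset (K l : List Int) (h : ∀ x ∈ l, x ∈ K) :
    PySem.Set.update K l = K := by
  induction l generalizing K with
  | nil => rfl
  | cons x l ih =>
    have hx : PySem.Set.add K x = K := by simp [PySem.Set.add, h x (by simp)]
    simp only [PySem.Set.update, List.foldl_cons] at *
    rw [hx]
    exact ih K (fun y hy => h y (by simp [hy]))

-- inner loop of A: getD after folding `modify … (· ++ [v i])` over a Nodup key list
theorem pvInner_getD (v : Int → Int) (L : List Int) (hL : L.Nodup)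
    (d : PySem.Dict Int (List Int)) (j : Int) :
    (L.foldl (fun d i => d.modify i [] (fun l => l ++ [v i])) d).getD j [] =
      if j ∈ L then d.getD j [] ++ [v j] else d.getD j [] := by
  induction L generalizing d with
  | nil => simp
  | cons x L ih =>
    have hL' : L.Nodup := hL.of_cons
    simp only [List.foldl_cons]
    rw [ih hL']
    by_cases hj : j = x
    · subst hj
      have : j ∉ L := by simpa using (List.nodup_cons.mp hL).1
      simp [this]
    · by_cases hjL : j ∈ L <;>
        simp [hj, hjL, PySem.Dict.getD_modify]

-- outer loop of A: each config appends its j-th entry to agent j's path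
theorem pvOuter_getD (L : List Int) (hL : L.Nodup) (cs : List (List Int))
    (d : PySem.Dict Int (List Int)) (j : Int) (hj : j ∈ L) :
    (cs.foldl
      (fun d config =>
        L.foldl (fun d i => d.modify i [] (fun l => l ++ [(PySem.List.pyGet? config i).getD 0])) d)
      d).getD j [] =
      d.getD j [] ++ cs.map (fun config => (PySem.List.pyGet? config j).getD 0) := by
  induction cs generalizing d with
  | nil => simp
  | cons c cs ih =>
    simp only [List.foldl_cons, List.map_cons]
    rw [ih, pvInner_getD _ L hL d j]
    simp [hj]

-- keys are untouched by the whole double loop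
theorem pvOuter_keys (L : List Int) (cs : List (List Int))
    (d : PySem.Dict Int (List Int)) (hd : ∀ x ∈ L, x ∈ d.keys) :
    (cs.foldl
      (fun d config =>
        L.foldl (fun d i => d.modify i [] (fun l => l ++ [(PySem.List.pyGet? config i).getD 0])) d)
      d).keys = d.keys := by
  induction cs generalizing d with
  | nil => rfl
  | cons c cs ih =>
    simp only [List.foldl_cons]
    have h1 : (L.foldl
        (fun d i => d.modify i [] (fun l => l ++ [(PySem.List.pyGet? c i).getD 0])) d).keys = d.keys := by
      rw [PySem.Dict.keys_foldl_modify L [] (fun d i l => l ++ [(PySem.List.pyGet? c i).getD 0]) d]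
      exact pvSet_update_of_subset d.keys L hd
    rw [ih _ (by simpa [h1] using hd), h1]

theorem pvRange_nodup (n : Nat) : (PySem.List.pyRange 0 (n : Int)).Nodup := by
  rw [PySem.List.pyRange_zero_natCast]
  exact (List.nodup_range).map (fun a b => by exact_mod_cast id)

-- the initial dict {i: [] for i in range(n)} has items (i, []) over the range
theorem pvInit_items (n : Nat) :
    ((PySem.List.pyRange 0 (n : Int)).foldl
      (fun d i => d.insert i ([] : List Int)) PySem.Dict.empty).items =
      (PySem.List.pyRange 0 (n : Int)).map (fun i => (i, ([] : List Int))) := by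
  have := PySem.Dict.items_foldl_insert_fresh (PySem.List.pyRange 0 (n : Int))
      (fun i => i) (fun _ => ([] : List Int)) (PySem.Dict.empty)
      (fun a _ => by simp) (by simpa using pvRange_nodup n)
  simpa using this

-- ===== VERDICT (by name: the statement is the Claim_ definition above) =====
theorem reconstruct_paths_from_config_sequence_py_spec : Claim_equal_reconstruct_paths_from_config_sequence_py := by
  intro cs _ hpre
  unfold Spec_reconstruct_paths_from_config_sequence_py
  unfold reconstruct_paths_from_config_sequence_py reconstruct_paths_from_config_sequence_py_alt
  match cs with
  | [] => rfl
  | c0 :: rest =>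
    simp only []
    set n : Nat := c0.length with hn
    set L : List Int := PySem.List.pyRange 0 (n : Int) with hLdef
    have hLnd : L.Nodup := pvRange_nodup n
    set init : PySem.Dict Int (List Int) :=
      L.foldl (fun d i => d.insert i ([] : List Int)) PySem.Dict.empty with hinit
    have hinit_items : init.items = L.map (fun i => (i, ([] : List Int))) := pvInit_items n
    have hinit_keys : init.keys = L := by
      simp only [PySem.Dict.keys, hinit_items, List.map_map]
      exact List.map_id L
    set final : PySem.Dict Int (List Int) :=
      (c0 :: rest).foldl
        (fun d config =>
          L.foldl (fun d i => d.modify i [] (fun l => l ++ [(PySem.List.pyGet? config i).getD 0])) d)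
        init with hfinal
    have hkeys : final.keys = L := by
      rw [hfinal, pvOuter_keys L (c0 :: rest) init (by simp [hinit_keys]), hinit_keys]
    have hnd : final.keys.Nodup := by rw [hkeys]; exact hLnd
    have hgetD : ∀ j ∈ L, final.getD j [] =
        (c0 :: rest).map (fun config => (PySem.List.pyGet? config j).getD 0) := by
      intro j hj
      rw [hfinal, pvOuter_getD L hLnd (c0 :: rest) init j hj]
      have : init.getD j [] = [] := by
        apply PySem.Dict.getD_of_mem_items init (v := ([] : List Int))
        · rw [hinit_items]; exact List.mem_map.mpr ⟨j, hj, rfl⟩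
        · rw [hinit_keys]; exact hLnd
      rw [this]; rfl
    rw [PySem.Dict.items_eq_map_keys final hnd [], hkeys]
    apply List.map_congr_left
    intro j hj
    rw [hgetD j hj]
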